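-- pv_equiv track=rewrite | github.com/GrayCatCode/Confluence_MySQL_stack | python/test3_write_to_confluence.py | format_for_confluence
-- ===== SOURCE A (Python) =====
-- def format_for_confluence(content):
--     """
--     Formats the content into Confluence Storage Format.
--     Assumes sections are separated by blank lines.
--     """
--     confluence_content = "<ac:structured-macro ac:name=\"section\">\n"
--     for line in content:
--         line = line.strip()
--         if not line:
--             # Close the current section and start a new one
--             confluence_content += "</ac:structured-macro>\n<ac:structured-macro ac:name=\"section\">\n"
--         else:
--             # Wrap each line in a paragraph tag
--             confluence_content += f"<p>{line}</p>\n"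
--     confluence_content += "</ac:structured-macro>"  # Close the last section
--     return confluence_content
-- ===== SOURCE B (Python) =====
-- def format_for_confluence(content):
--     # Group stripped lines into sections (a blank line ends a section), then render and join.
--     groups = [[]]
--     for line in content:
--         stripped = line.strip()
--         if stripped:
--             groups[-1].append(stripped)
--         else:
--             groups.append([])
--     sections = [
--         '<ac:structured-macro ac:name="section">\n'
--         + ''.join('<p>%s</p>\n' % line for line in group)
--         + '</ac:structured-macro>'
--         for group in groups
--     ]
--     return '\n'.join(sections)
-- ===== Notes on version B (the rewrite author's own statement) =====
-- stated objective: alternative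
-- what changed: Replaces A's single pass that appends boundary markers into one growing string with a two-phase pipeline: first group stripped lines into sections split at blank lines, then render each section and join the renderings with a newline.
import Mathlib
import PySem

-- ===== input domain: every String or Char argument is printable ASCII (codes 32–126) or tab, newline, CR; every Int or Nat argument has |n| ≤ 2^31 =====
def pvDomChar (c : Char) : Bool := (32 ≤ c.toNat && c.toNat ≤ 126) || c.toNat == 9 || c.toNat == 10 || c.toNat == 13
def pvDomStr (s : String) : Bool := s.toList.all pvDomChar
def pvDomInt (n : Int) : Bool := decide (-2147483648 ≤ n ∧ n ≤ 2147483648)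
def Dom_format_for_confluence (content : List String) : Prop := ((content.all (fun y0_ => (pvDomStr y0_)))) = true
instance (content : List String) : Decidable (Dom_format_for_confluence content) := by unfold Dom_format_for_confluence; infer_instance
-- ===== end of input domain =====

-- B groups stripped lines into sections split at blank lines, renders each section, and joins the
-- renderings with "\n" — an alternative decomposition of A's single accumulating pass (same output).

-- ===== PORT A =====
def format_for_confluence (content : List String) : String :=
  (content.foldl (fun confluence_content line0 =>
      let line := PySem.Str.strip line0
      if line = "" then
        confluence_content ++ "</ac:structured-macro>\n<ac:structured-macro ac:name=\"section\">\n"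
      else
        confluence_content ++ ("<p>" ++ line ++ "</p>\n"))
    "<ac:structured-macro ac:name=\"section\">\n")
  ++ "</ac:structured-macro>"

-- ===== PORT B =====
-- one loop step: groups[-1].append(stripped) / groups.append([]) — groups is always nonempty
def fcStep (groups : List (List String)) (line : String) : List (List String) :=
  let stripped := PySem.Str.strip line
  if stripped = "" then groups ++ [[]]
  else groups.dropLast ++ [groups.getLastD [] ++ [stripped]]

def fcRender (group : List String) : String :=
  "<ac:structured-macro ac:name=\"section\">\n"
    ++ PySem.Str.join "" (group.map (fun line => "<p>" ++ line ++ "</p>\n"))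
    ++ "</ac:structured-macro>"

def format_for_confluence_alt (content : List String) : String :=
  PySem.Str.join "\n" ((content.foldl fcStep [[]]).map fcRender)

-- ===== PRECONDITION & SPEC =====
def Spec_format_for_confluence (content : List String) (out : String) : Prop := out = format_for_confluence_alt content
instance (content : List String) (out : String) : Decidable (Spec_format_for_confluence content out) := by unfold Spec_format_for_confluence; infer_instance

-- ===== CLAIM (what is proved, stated in full; the proofs are below) =====
def Claim_equal_format_for_confluence : Prop := ∀ (content : List String), Dom_format_for_confluence content → Spec_format_for_confluence content (format_for_confluence content)

-- ===== LEMMAS AND PROOFS =====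

theorem strJoin_cons_cons (sep a b : String) (t : List String) :
    PySem.Str.join sep (a :: b :: t) = a ++ sep ++ PySem.Str.join sep (b :: t) := by
  rw [← String.toList_inj]; simp [PySem.Chars.join_cons_cons]

theorem strJoin_singleton (sep a : String) : PySem.Str.join sep [a] = a := by
  rw [← String.toList_inj]; simp [PySem.Chars.join_singleton]

theorem strJoin_nil (sep : String) : PySem.Str.join sep [] = "" := by
  rw [← String.toList_inj]; simp [PySem.Chars.join_nil]

theorem strJoin_empty_cons (a : String) (t : List String) :
    PySem.Str.join "" (a :: t) = a ++ PySem.Str.join "" t := by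
  cases t with
  | nil => rw [strJoin_singleton, strJoin_nil, String.append_empty]
  | cons b t => rw [strJoin_cons_cons, String.append_empty]

-- the paragraphs of one section, B's inner ''.join
def fcParas (group : List String) : String :=
  PySem.Str.join "" (group.map (fun line => "<p>" ++ line ++ "</p>\n"))

theorem fcRender_eq (g : List String) :
    fcRender g = "<ac:structured-macro ac:name=\"section\">\n" ++ fcParas g
      ++ "</ac:structured-macro>" := rfl

theorem fcParas_nil : fcParas [] = "" := strJoin_nil ""

theorem fcParas_cons (l : String) (g : List String) :
    fcParas (l :: g) = "<p>" ++ l ++ "</p>\n" ++ fcParas g := by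
  unfold fcParas
  rw [List.map_cons, strJoin_empty_cons]

-- recursive view of B's grouping loop: split at blank (stripped) lines
def fcSplit : List String → List (List String)
  | [] => [[]]
  | l :: ls =>
    if PySem.Str.strip l = "" then [] :: fcSplit ls
    else
      match fcSplit ls with
      | g :: gs => (PySem.Str.strip l :: g) :: gs
      | [] => [[PySem.Str.strip l]]

theorem fcSplit_ne_nil (ls : List String) : fcSplit ls ≠ [] := by
  cases ls with
  | nil => simp [fcSplit]
  | cons l ls =>
    simp only [fcSplit]
    split
    · simp
    · cases h : fcSplit ls <;> simp

-- what A appends after the initial opening tag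
def fcT : List String → String
  | [] => "</ac:structured-macro>"
  | l :: ls =>
    if PySem.Str.strip l = "" then
      "</ac:structured-macro>" ++ "\n" ++ "<ac:structured-macro ac:name=\"section\">\n" ++ fcT ls
    else
      "<p>" ++ PySem.Str.strip l ++ "</p>\n" ++ fcT ls

theorem fcLit_eq :
    "</ac:structured-macro>\n<ac:structured-macro ac:name=\"section\">\n"
      = "</ac:structured-macro>" ++ "\n" ++ "<ac:structured-macro ac:name=\"section\">\n" := by
  decide

def fcMergeFirst (g : List String) : List (List String) → List (List String)
  | [] => [g]
  | h :: t => (g ++ h) :: t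

-- "\n"-separated tail of the rendered sections
def fcSuffix : List (List String) → String
  | [] => ""
  | g :: gs => "\n" ++ fcRender g ++ fcSuffix gs

theorem fcJoin (g : List String) (gs : List (List String)) :
    PySem.Str.join "\n" ((g :: gs).map fcRender) = fcRender g ++ fcSuffix gs := by
  induction gs generalizing g with
  | nil => simp [strJoin_singleton, fcSuffix, String.append_empty]
  | cons g' gs' ih =>
    rw [List.map_cons, List.map_cons, strJoin_cons_cons, ← List.map_cons, ih g']
    simp [fcSuffix, String.append_assoc]

theorem fcFoldA (ls : List String) (acc : String) :
    (ls.foldl (fun confluence_content line0 =>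
        let line := PySem.Str.strip line0
        if line = "" then
          confluence_content ++ "</ac:structured-macro>\n<ac:structured-macro ac:name=\"section\">\n"
        else
          confluence_content ++ ("<p>" ++ line ++ "</p>\n")) acc)
      ++ "</ac:structured-macro>" = acc ++ fcT ls := by
  induction ls generalizing acc with
  | nil => simp [fcT]
  | cons l ls ih =>
    simp only [List.foldl_cons, fcT]
    split
    · rw [ih, fcLit_eq]
      simp [String.append_assoc]
    · rw [ih]
      simp [String.append_assoc]

theorem fcFoldB (ls : List String) (init : List (List String)) (g : List String) :
    ls.foldl fcStep (init ++ [g]) = init ++ fcMergeFirst g (fcSplit ls) := by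
  induction ls generalizing init g with
  | nil => simp [fcSplit, fcMergeFirst]
  | cons l ls ih =>
    simp only [List.foldl_cons, fcStep, fcSplit]
    split
    · rw [show (init ++ [g]) ++ [[]] = (init ++ [g]) ++ [([] : List String)] from rfl, ih]
      cases h : fcSplit ls with
      | nil => exact absurd h (fcSplit_ne_nil ls)
      | cons g' gs' => simp [fcMergeFirst]
    · rw [List.dropLast_concat, List.getLastD_concat, ih]
      cases h : fcSplit ls with
      | nil => exact absurd h (fcSplit_ne_nil ls)
      | cons g' gs' => simp [fcMergeFirst]

theorem fcSplit_T (ls : List String) (g : List String) (gs : List (List String))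
    (h : fcSplit ls = g :: gs) :
    fcT ls = fcParas g ++ "</ac:structured-macro>" ++ fcSuffix gs := by
  induction ls generalizing g gs with
  | nil =>
    simp only [fcSplit] at h
    cases h
    simp [fcT, fcParas_nil, fcSuffix, String.empty_append, String.append_empty]
  | cons l ls ih =>
    simp only [fcSplit] at h
    by_cases hb : PySem.Str.strip l = ""
    · rw [if_pos hb] at h
      cases h
      cases h' : fcSplit ls with
      | nil => exact absurd h' (fcSplit_ne_nil ls)
      | cons g' gs' =>
        have hT : fcT (l :: ls)
            = "</ac:structured-macro>" ++ "\n" ++ "<ac:structured-macro ac:name=\"section\">\n"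
              ++ fcT ls := by
          simp only [fcT]
          rw [if_pos hb]
        rw [hT, ih g' gs' h', fcParas_nil]
        simp only [fcSuffix, fcRender_eq]
        rw [String.empty_append]
        simp only [String.append_assoc]
    · rw [if_neg hb] at h
      cases h' : fcSplit ls with
      | nil => exact absurd h' (fcSplit_ne_nil ls)
      | cons g' gs' =>
        rw [h'] at h
        injection h with h1 h2
        subst h1
        subst h2
        rw [show fcT (l :: ls) = "<p>" ++ PySem.Str.strip l ++ "</p>\n" ++ fcT ls from by
            simp [fcT, hb],
          ih g' gs' h', fcParas_cons]
        simp [String.append_assoc]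

-- ===== VERDICT (by name: the statement is the Claim_ definition above) =====
theorem format_for_confluence_spec : Claim_equal_format_for_confluence := by
  intro content _
  unfold Spec_format_for_confluence format_for_confluence format_for_confluence_alt
  cases h : fcSplit content with
  | nil => exact absurd h (fcSplit_ne_nil content)
  | cons g gs =>
    have hg : content.foldl fcStep [[]] = g :: gs := by
      have h2 := fcFoldB content [] []
      rw [h] at h2
      simpa [fcMergeFirst] using h2
    rw [fcFoldA content, hg, fcJoin, fcSplit_T content g gs h, fcRender_eq]
    simp [String.append_assoc]
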